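-- pv_equiv track=rewrite | github.com/So-bonkers/Detecting-Convolutional-Codes-Via-Markovian-Statistics | comp_parity.py | anchors_for_template
-- ===== SOURCE A (Python) =====
-- from typing import List, Tuple
--
-- def normalize_tapvecs(gens_by_n_k: List[List[List[int]]]) -> List[List[List[int]]]:
--     maxlen = 0
--     for out in gens_by_n_k:
--         for taps in out:
--             maxlen = max(maxlen, len(taps))
--     if maxlen == 0:
--         return gens_by_n_k
--     out = []
--     for outgens in gens_by_n_k:
--         new_out = []
--         for taps in outgens:
--             if len(taps) < maxlen:
--                 new_out.append(taps + [0] * (maxlen - len(taps)))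
--             else:
--                 new_out.append(taps[:maxlen])
--         out.append(new_out)
--     return out
--
-- def anchors_for_template(gens_by_n_k: List[List[List[int]]], offsets: Tuple[Tuple[str,int], ...], K: int, terminate: bool=True):
--     gens_by_n_k = normalize_tapvecs(gens_by_n_k)
--     Lmax = 0
--     for outgens in gens_by_n_k:
--         for g in outgens:
--             Lmax = max(Lmax, len(g))
--     m = max(0, Lmax-1)
--     T = K + m if terminate else K
--     display_times = list(range(0, T))
--     display_set = set(display_times)
--     valid_anchors = []
--     for a in display_times:
--         ok = True
--         for (_kind, off) in offsets:
--             if (a + off) not in display_set: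
--                 ok = False
--                 break
--         if ok:
--             valid_anchors.append(a)
--     return sorted(valid_anchors)
-- ===== SOURCE B (Python) =====
-- def anchors_for_template(gens_by_n_k, offsets, K, terminate=True):
--     # Interval intersection: a is valid iff 0 <= a < T and 0 <= a+off < T for
--     # every offset, i.e. a lies in [max(0, -off...), min(T, T-off...)).
--     Lmax = 0
--     for outgens in gens_by_n_k:
--         for g in outgens:
--             Lmax = max(Lmax, len(g))
--     T = K + max(0, Lmax - 1) if terminate else K
--     lo, hi = 0, T
--     for _kind, off in offsets:
--         lo = max(lo, -off)
--         hi = min(hi, T - off)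
--     return list(range(lo, hi))
-- ===== Notes on version B (the rewrite author's own statement) =====
-- stated objective: faster
-- what changed: Replaces the per-time scan over all offsets with membership tests in a set (O(T*|offsets|)) by a single pass over the offsets computing the intersection interval [max(0,-off), min(T,T-off)) and returning that range directly; normalization is skipped since it cannot change the maximal tap length.
import Mathlib
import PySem

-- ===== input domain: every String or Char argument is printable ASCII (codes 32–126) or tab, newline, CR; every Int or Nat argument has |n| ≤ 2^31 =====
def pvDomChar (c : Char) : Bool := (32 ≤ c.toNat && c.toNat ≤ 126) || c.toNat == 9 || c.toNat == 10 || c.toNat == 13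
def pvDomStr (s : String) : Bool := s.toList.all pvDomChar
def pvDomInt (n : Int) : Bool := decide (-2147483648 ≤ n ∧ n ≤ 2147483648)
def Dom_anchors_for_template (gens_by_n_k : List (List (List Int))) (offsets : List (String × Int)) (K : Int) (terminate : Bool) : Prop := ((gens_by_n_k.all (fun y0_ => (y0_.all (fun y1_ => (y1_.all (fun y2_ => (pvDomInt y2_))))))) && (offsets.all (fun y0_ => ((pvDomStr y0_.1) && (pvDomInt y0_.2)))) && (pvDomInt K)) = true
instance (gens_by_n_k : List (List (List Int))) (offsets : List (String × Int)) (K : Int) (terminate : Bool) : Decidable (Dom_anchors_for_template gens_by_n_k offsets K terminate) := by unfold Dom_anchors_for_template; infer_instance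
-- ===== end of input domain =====

-- B replaces A's per-time scan (membership of a+off in a set, for every offset) by one
-- pass over the offsets computing the intersection interval [lo, hi) and returning that
-- range directly, and skips normalization (it cannot change the maximal tap length).

-- ===== PORT A =====
-- helper: normalize_tapvecs.  taps[:maxlen] with maxlen ≥ 0 is List.take maxlen (exact).
def pvNormalize (gens_by_n_k : List (List (List Int))) : List (List (List Int)) :=
  let maxlen := gens_by_n_k.foldl (fun m outg => outg.foldl (fun m taps => max m taps.length) m) 0
  if maxlen = 0 then gens_by_n_k
  else gens_by_n_k.foldl (fun out outgens =>
    out ++ [outgens.foldl (fun newOut taps =>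
      newOut ++ [if taps.length < maxlen then taps ++ List.replicate (maxlen - taps.length) 0
                 else taps.take maxlen]) []]) []

def anchors_for_template (gens_by_n_k : List (List (List Int))) (offsets : List (String × Int)) (K : Int) (terminate : Bool) : List Int :=
  let g := pvNormalize gens_by_n_k
  let Lmax : Nat := g.foldl (fun m outg => outg.foldl (fun m t => max m t.length) m) 0
  let m : Int := max 0 ((Lmax : Int) - 1)
  let T : Int := if terminate then K + m else K
  let display_times := PySem.List.pyRange 0 T 1
  let display_set : PySem.Set Int := PySem.Set.ofList display_times
  -- Python's inner for-loop with break computes exactly "all offsets pass"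
  let valid := display_times.foldl (fun acc a =>
    if offsets.all (fun p => PySem.Set.contains display_set (a + p.2)) then acc ++ [a] else acc) []
  PySem.List.sorted valid (fun x => x) false

-- ===== PORT B =====
def anchors_for_template_alt (gens_by_n_k : List (List (List Int))) (offsets : List (String × Int)) (K : Int) (terminate : Bool) : List Int :=
  let Lmax : Nat := gens_by_n_k.foldl (fun m outg => outg.foldl (fun m t => max m t.length) m) 0
  let T : Int := if terminate then K + max 0 ((Lmax : Int) - 1) else K
  let lh := offsets.foldl (fun (p : Int × Int) q => (max p.1 (-q.2), min p.2 (T - q.2))) (0, T)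
  PySem.List.pyRange lh.1 lh.2 1

-- ===== PRECONDITION & SPEC =====
def Spec_anchors_for_template (gens_by_n_k : List (List (List Int))) (offsets : List (String × Int)) (K : Int) (terminate : Bool) (out : List Int) : Prop := out = anchors_for_template_alt gens_by_n_k offsets K terminate
instance (gens_by_n_k : List (List (List Int))) (offsets : List (String × Int)) (K : Int) (terminate : Bool) (out : List Int) : Decidable (Spec_anchors_for_template gens_by_n_k offsets K terminate out) := by unfold Spec_anchors_for_template; infer_instance

-- ===== CLAIM (what is proved, stated in full; the proofs are below) =====
def Claim_equal_anchors_for_template : Prop := ∀ (gens_by_n_k : List (List (List Int))) (offsets : List (String × Int)) (K : Int) (terminate : Bool), Dom_anchors_for_template gens_by_n_k offsets K terminate → Spec_anchors_for_template gens_by_n_k offsets K terminate (anchors_for_template gens_by_n_k offsets K terminate)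

-- ===== LEMMAS AND PROOFS =====

-- a fold over lists that are all empty leaves the accumulator
theorem pv_allEmpty_fold (g : List (List (List Int))) (init : Nat)
    (h : ∀ outg ∈ g, outg = []) :
    g.foldl (fun m outg => outg.foldl (fun m t => max m t.length) m) init = init := by
  induction g generalizing init with
  | nil => rfl
  | cons o r ih =>
    have ho := h o (by simp)
    simp only [List.foldl_cons, ho, List.foldl_nil]
    exact ih init (fun x hx => h x (by simp [hx]))

-- fold of a constant max is an if
theorem pv_const_fold (l : List (List Int)) (c m : Nat) :
    l.foldl (fun m (_ : List Int) => max m c) m = if l.isEmpty then m else max m c := by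
  induction l generalizing m with
  | nil => rfl
  | cons t r ih => simp only [List.foldl_cons, ih]; cases r.isEmpty <;> simp

theorem pv_outer_if_fold (g : List (List (List Int))) (c init : Nat) :
    g.foldl (fun m outg => if outg.isEmpty then m else max m c) init
      = if (∀ outg ∈ g, outg = []) then init else max init c := by
  induction g generalizing init with
  | nil => simp
  | cons o r ih =>
    simp only [List.foldl_cons]
    rcases o with _ | ⟨t, ts⟩
    · simp only [List.isEmpty_nil, ih]
      by_cases h : ∀ outg ∈ r, outg = [] <;> simp [h]
    · simp only [List.isEmpty_cons, Bool.false_eq_true, if_false, ih]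
      by_cases h : ∀ outg ∈ r, outg = [] <;> simp [h]

-- the maximal tap length is unchanged by normalization
theorem pv_maxLen_normalize (g : List (List (List Int))) :
    (pvNormalize g).foldl (fun m outg => outg.foldl (fun m t => max m t.length) m) 0
      = g.foldl (fun m outg => outg.foldl (fun m t => max m t.length) m) 0 := by
  unfold pvNormalize
  set c := g.foldl (fun m outg => outg.foldl (fun m t => max m t.length) m) 0 with hc
  by_cases h0 : c = 0
  · simp [h0, ← hc]
  · simp only [if_neg h0]
    rw [PySem.List.foldl_append_singleton_eq_map
      (f := fun outgens : List (List Int) => outgens.foldl (fun newOut taps =>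
        newOut ++ [if taps.length < c then taps ++ List.replicate (c - taps.length) 0
                   else taps.take c]) [])]
    simp only [List.nil_append]
    have hmap : ∀ outgens : List (List Int),
        outgens.foldl (fun newOut taps =>
          newOut ++ [if taps.length < c then taps ++ List.replicate (c - taps.length) 0
                     else taps.take c]) []
        = outgens.map (fun taps => if taps.length < c then taps ++ List.replicate (c - taps.length) 0
                     else taps.take c) := by
      intro outgens
      rw [PySem.List.foldl_append_singleton_eq_map]; simp
    have hlen : ∀ taps : List Int,
        (if taps.length < c then taps ++ List.replicate (c - taps.length) 0
         else taps.take c).length = c := by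
      intro taps; split <;> simp <;> omega
    have hrw : ∀ outgens : List (List Int), ∀ m : Nat,
        ((outgens.map (fun taps => if taps.length < c then taps ++ List.replicate (c - taps.length) 0
          else taps.take c)).foldl (fun m t => max m t.length) m)
        = if outgens.isEmpty then m else max m c := by
      intro outgens m
      rw [List.foldl_map]
      simp only [hlen]
      exact pv_const_fold outgens c m
    have hstep : (g.map (fun outgens => outgens.foldl (fun newOut taps =>
          newOut ++ [if taps.length < c then taps ++ List.replicate (c - taps.length) 0
                     else taps.take c]) [])).foldl (fun m outg => outg.foldl (fun m t => max m t.length) m) 0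
        = g.foldl (fun m outgens => if outgens.isEmpty then m else max m c) 0 := by
      rw [List.foldl_map]
      apply PySem.List.foldl_congr_mem
      intro m outgens _
      rw [hmap, hrw]
    rw [hstep, pv_outer_if_fold]
    have hne : ¬ ∀ outg ∈ g, outg = [] := by
      intro hall
      exact h0 (by rw [hc]; exact pv_allEmpty_fold g 0 hall)
    simp [hne]

-- the (lo,hi) fold: bounds monotonicity
theorem pv_fold_bounds (T : Int) (offsets : List (String × Int)) (l h : Int) :
    l ≤ (offsets.foldl (fun (p : Int × Int) q => (max p.1 (-q.2), min p.2 (T - q.2))) (l, h)).1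
    ∧ (offsets.foldl (fun (p : Int × Int) q => (max p.1 (-q.2), min p.2 (T - q.2))) (l, h)).2 ≤ h := by
  induction offsets generalizing l h with
  | nil => simp
  | cons q r ih =>
    simp only [List.foldl_cons]
    have := ih (max l (-q.2)) (min h (T - q.2))
    omega

-- the (lo,hi) fold: characterization of membership in the final interval
theorem pv_fold_char (T : Int) (offsets : List (String × Int)) (l h a : Int) :
    ((offsets.foldl (fun (p : Int × Int) q => (max p.1 (-q.2), min p.2 (T - q.2))) (l, h)).1 ≤ a
     ∧ a < (offsets.foldl (fun (p : Int × Int) q => (max p.1 (-q.2), min p.2 (T - q.2))) (l, h)).2)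
    ↔ (l ≤ a ∧ a < h ∧ ∀ q ∈ offsets, 0 ≤ a + q.2 ∧ a + q.2 < T) := by
  induction offsets generalizing l h with
  | nil => simp
  | cons q r ih =>
    simp only [List.foldl_cons]
    rw [ih]
    constructor
    · rintro ⟨h1, h2, h3⟩
      refine ⟨by omega, by omega, ?_⟩
      intro p hp
      rw [List.mem_cons] at hp
      rcases hp with hp | hp
      · subst hp; omega
      · exact h3 p hp
    · rintro ⟨h1, h2, h3⟩
      have hq := h3 q (by simp)
      exact ⟨by omega, by omega, fun p hp => h3 p (by simp [hp])⟩

-- filtering a unit-step range by an interval predicate clips the range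
theorem pv_filter_range (n : Nat) : ∀ (a b lo hi : Int), (b - a).toNat = n →
    (PySem.List.pyRange a b 1).filter (fun x => decide (lo ≤ x ∧ x < hi))
      = PySem.List.pyRange (max a lo) (min b hi) 1 := by
  induction n with
  | zero =>
    intro a b lo hi hn
    have hba : b ≤ a := by omega
    rw [PySem.List.pyRange_one_eq_nil hba, PySem.List.pyRange_one_eq_nil (by omega)]
    rfl
  | succ k ih =>
    intro a b lo hi hn
    have hab : a < b := by omega
    rw [PySem.List.pyRange_one_cons hab]
    simp only [List.filter_cons]
    by_cases hc : lo ≤ a ∧ a < hi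
    · rw [if_pos (by simpa using hc)]
      rw [ih (a + 1) b lo hi (by omega)]
      have h1 : max a lo = a := by omega
      have h2 : max (a + 1) lo = a + 1 := by omega
      have hmin : a < min b hi := lt_min hab hc.2
      rw [h1, h2]
      conv_rhs => rw [PySem.List.pyRange_one_cons hmin]
    · rw [if_neg (by simpa using hc)]
      rw [ih (a + 1) b lo hi (by omega)]
      by_cases hlo : a < lo
      · have : max a lo = max (a + 1) lo := by omega
        rw [this]
      · have hhi : hi ≤ a := by omega
        rw [PySem.List.pyRange_one_eq_nil (by omega), PySem.List.pyRange_one_eq_nil (by omega)]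

-- ===== VERDICT (by name: the statement is the Claim_ definition above) =====
theorem anchors_for_template_spec : Claim_equal_anchors_for_template := by
  intro gens offsets K terminate _
  unfold Spec_anchors_for_template anchors_for_template anchors_for_template_alt
  simp only []
  rw [pv_maxLen_normalize]
  set Lmax : Nat := gens.foldl (fun m outg => outg.foldl (fun m t => max m t.length) m) 0 with hL
  set T : Int := if terminate then K + max 0 ((Lmax : Int) - 1) else K with hT
  set lh := offsets.foldl (fun (p : Int × Int) q => (max p.1 (-q.2), min p.2 (T - q.2))) (0, T) with hlh
  rw [PySem.List.foldl_append_if_eq_filter]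
  have hcongr : ∀ a ∈ PySem.List.pyRange 0 T 1,
      (offsets.all (fun p => PySem.Set.contains (PySem.Set.ofList (PySem.List.pyRange 0 T 1)) (a + p.2)))
        = decide (lh.1 ≤ a ∧ a < lh.2) := by
    intro a ha
    have ha' : 0 ≤ a ∧ a < T := (PySem.List.mem_pyRange_one).1 ha
    have hmem : ∀ x : Int,
        PySem.Set.contains (PySem.Set.ofList (PySem.List.pyRange 0 T 1)) x = decide (0 ≤ x ∧ x < T) := by
      intro x
      rw [Bool.eq_iff_iff, PySem.Set.contains_iff, PySem.Set.mem_ofList, PySem.List.mem_pyRange_one]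
      simp
    simp only [hmem]
    rw [Bool.eq_iff_iff, List.all_eq_true]
    simp only [decide_eq_true_iff]
    rw [hlh, pv_fold_char]
    constructor
    · intro h
      exact ⟨ha'.1, ha'.2, fun q hq => h q hq⟩
    · intro h q hq
      exact h.2.2 q hq
  rw [List.filter_congr hcongr]
  rw [pv_filter_range (T - 0).toNat 0 T lh.1 lh.2 rfl]
  have hb := pv_fold_bounds T offsets 0 T
  rw [← hlh] at hb
  have h1 : max 0 lh.1 = lh.1 := by omega
  have h2 : min T lh.2 = lh.2 := by omega
  rw [h1, h2, List.nil_append]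
  exact PySem.List.sorted_eq_of_perm_of_pairwise_lt _ _ (fun x => x) (List.Perm.refl _)
    (by simpa using PySem.List.pairwise_lt_pyRange_one lh.1 lh.2)
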